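-- pv_equiv track=rewrite | github.com/looloolalaa/Python-Challenge | PRO_매출하락-after.py | solution
-- ===== SOURCE A (Python) =====
-- from collections import defaultdict
--
-- def solution(sales, links):
--     tree = defaultdict(set)
--     for p, c in links:
--         tree[p].add(c)
--
--     mini = {}
--
--     def two_min(n):
--         if n in mini:
--             return mini[n]
--         if n not in tree:
--             return [0, sales[n-1]]
--         sum_child = sum(min(two_min(child)) for child in tree[n])
--         first_min = min(sum_child - min(two_min(child)) + two_min(child)[1] for child in tree[n])
--         second_min = sales[n-1] + sum_child
--         mini[n] = [first_min, second_min]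
--         return mini[n]
--
--     return min(two_min(1))
-- ===== SOURCE B (Python) =====
-- def solution(sales, links):
--     # Bottom-up fixpoint iteration instead of A's memoized top-down recursion:
--     # compute the set of nodes reachable from 1, then fill a value table in
--     # rounds, settling every node whose children are already settled, until
--     # node 1 is settled.  Return value only; no argument is mutated.
--     children = {}
--     for p, c in links:
--         s = children.get(p, set())
--         s.add(c)
--         children[p] = s
--
--     reach = {1}
--     while True:
--         new = {c for p, c in links if p in reach} - reach
--         if not new:
--             break
--         reach = reach | new
--
--     vals = {}
--     while 1 not in vals:
--         for n in reach:
--             if n in vals: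
--                 continue
--             cs = children.get(n)
--             if not cs:
--                 vals[n] = (0, sales[n - 1])
--             elif all(c in vals for c in cs):
--                 sc = sum(min(vals[c]) for c in cs)
--                 vals[n] = (min(sc - min(vals[c]) + vals[c][1] for c in cs),
--                            sales[n - 1] + sc)
--     return min(vals[1])
-- ===== Notes on version B (the rewrite author's own statement) =====
-- stated objective: alternative
-- what changed: Replaces A's memoized top-down recursion with an explicit bottom-up fixpoint: B computes the set of nodes reachable from 1 and then fills a value table in rounds, settling each node once all its children are settled, until node 1 is settled.
import Mathlib
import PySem

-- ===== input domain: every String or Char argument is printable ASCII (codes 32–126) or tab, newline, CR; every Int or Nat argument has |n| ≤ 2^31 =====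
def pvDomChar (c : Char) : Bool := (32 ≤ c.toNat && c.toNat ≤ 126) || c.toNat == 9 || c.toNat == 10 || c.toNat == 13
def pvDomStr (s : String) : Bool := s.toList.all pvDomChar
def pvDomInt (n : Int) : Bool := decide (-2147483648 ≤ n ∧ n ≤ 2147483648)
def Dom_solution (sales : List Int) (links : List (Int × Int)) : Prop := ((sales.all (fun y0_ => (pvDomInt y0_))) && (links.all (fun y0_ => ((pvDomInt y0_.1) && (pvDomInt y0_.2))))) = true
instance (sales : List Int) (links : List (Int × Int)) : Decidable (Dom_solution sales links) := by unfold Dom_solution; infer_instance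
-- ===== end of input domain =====

-- B replaces A's memoized top-down recursion by a bottom-up fixpoint iteration over the
-- nodes reachable from 1 (objective: alternative decomposition; return value only, no mutation).

-- ===== PORT A =====
-- shared helper: both Pythons build the same parent -> set-of-children map
-- (A: 'tree = defaultdict(set); tree[p].add(c)', B: 'children.get(p, set()).add(c)')
def pvChildMap (links : List (Int × Int)) : PySem.Dict Int (PySem.Set Int) :=
  links.foldl
    (fun d pc => d.insert pc.1 (PySem.Set.add (d.getD pc.1 PySem.Set.empty) pc.2))
    PySem.Dict.empty

-- A's 'two_min', threading the memo dict 'mini'; the fuel argument only makes the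
-- recursion well-founded (none = the Python recursion would not have returned normally)
def twoMinA (sales : List Int) (tr : PySem.Dict Int (PySem.Set Int)) :
    Nat → PySem.Dict Int (Int × Int) → Int → Option ((Int × Int) × PySem.Dict Int (Int × Int))
  | 0, _, _ => none
  | fuel+1, memo, n =>
    match memo.get? n with
    | some v => some (v, memo)
    | none =>
      match tr.get? n with
      | none => (PySem.List.pyGet? sales (n - 1)).map (fun s => (((0 : Int), s), memo))
      | some cs =>
        -- sum_child = sum(min(two_min(child)) for child in tree[n])
        match cs.foldl (fun st c => st.bind (fun p =>
            (twoMinA sales tr fuel p.2 c).map (fun q => (p.1 + min q.1.1 q.1.2, q.2))))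
            (some ((0 : Int), memo)) with
        | none => none
        | some (sc, m1) =>
          -- first_min = min(sum_child - min(two_min(child)) + two_min(child)[1] for child in tree[n])
          match cs.foldl (fun st c => st.bind (fun p =>
              (twoMinA sales tr fuel p.2 c).bind (fun q1 =>
                (twoMinA sales tr fuel q1.2 c).map (fun q2 =>
                  ((some (match p.1 with
                         | none => sc - min q1.1.1 q1.1.2 + q2.1.2
                         | some x => min x (sc - min q1.1.1 q1.1.2 + q2.1.2)) : Option Int), q2.2)))))
              (some ((none : Option Int), m1)) with
          | none => none
          | some (none, _) => none   -- min() over an empty set raises; unreachable: stored sets are nonempty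
          | some (some fm, m2) =>
            (PySem.List.pyGet? sales (n - 1)).map (fun s =>
              ((fm, s + sc), m2.insert n (fm, s + sc)))
  termination_by fuel _ _ => fuel

def solution (sales : List Int) (links : List (Int × Int)) : Int :=
  let tree := pvChildMap links
  match twoMinA sales tree (links.length + 1) PySem.Dict.empty 1 with
  | some (v, _) => min v.1 v.2
  | none => 0   -- the Python would have raised (cycle / bad index); unreachable under Pre_

-- ===== PORT B =====
-- 'sum(min(vals[c]) for c in cs)' with lookup g
def pvSumCh (g : Int → Int × Int) (cs : List Int) : Int :=
  cs.foldl (fun acc c => acc + min (g c).1 (g c).2) 0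

-- 'min(sc - min(vals[c]) + vals[c][1] for c in cs)' with lookup g (none = empty cs, ValueError)
def pvMinCh (g : Int → Int × Int) (sc : Int) (cs : List Int) : Option Int :=
  cs.foldl (fun mn c =>
    (some (match mn with
           | none => sc - min (g c).1 (g c).2 + (g c).2
           | some x => min x (sc - min (g c).1 (g c).2 + (g c).2)) : Option Int)) none

-- one candidate set of new nodes: '{c for p, c in links if p in reach} - reach'
def pvNew (links : List (Int × Int)) (r : PySem.Set Int) : PySem.Set Int :=
  PySem.Set.diff (PySem.Set.ofList ((links.filter (fun pc => PySem.Set.contains r pc.1)).map (·.2))) r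

-- Source B's 'while True: new = ...; if not new: break; reach = reach | new' (fuel only
-- bounds the loop; links.length + 1 iterations always reach the break)
def pvGrow (links : List (Int × Int)) : Nat → PySem.Set Int → PySem.Set Int
  | 0, r => r
  | fuel+1, r =>
    let nw := pvNew links r
    if nw.isEmpty then r else pvGrow links fuel (PySem.Set.union r nw)

def pvReach (links : List (Int × Int)) : PySem.Set Int :=
  pvGrow links (links.length + 1) (PySem.Set.add PySem.Set.empty 1)

-- the body of Source B's 'for n in reach' round
def pvStepB (sales : List Int) (ch : PySem.Dict Int (PySem.Set Int))
    (vals : PySem.Dict Int (Int × Int)) (n : Int) : PySem.Dict Int (Int × Int) :=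
  if (vals.get? n).isSome then vals
  else
    match ch.get? n with
    | none => vals.insert n ((0 : Int), PySem.List.pyGetD sales (n - 1) 0)
    | some cs =>
      if cs.all (fun c => (vals.get? c).isSome) then
        match pvMinCh (fun c => vals.getD c ((0 : Int), (0 : Int)))
            (pvSumCh (fun c => vals.getD c ((0 : Int), (0 : Int))) cs) cs with
        | some fm => vals.insert n (fm, PySem.List.pyGetD sales (n - 1) 0
            + pvSumCh (fun c => vals.getD c ((0 : Int), (0 : Int))) cs)
        | none => vals   -- unreachable: stored child sets are nonempty
      else vals

def pvRoundB (sales : List Int) (ch : PySem.Dict Int (PySem.Set Int))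
    (reach : List Int) (vals : PySem.Dict Int (Int × Int)) : PySem.Dict Int (Int × Int) :=
  reach.foldl (pvStepB sales ch) vals

-- Source B's 'while 1 not in vals' loop (fuel only bounds the loop; under Pre_ the loop
-- settles node 1 within links.length + 2 rounds)
def pvBLoop (sales : List Int) (ch : PySem.Dict Int (PySem.Set Int)) (reach : List Int) :
    Nat → PySem.Dict Int (Int × Int) → PySem.Dict Int (Int × Int)
  | 0, vals => vals
  | fuel+1, vals =>
    if (vals.get? 1).isSome then vals
    else pvBLoop sales ch reach fuel (pvRoundB sales ch reach vals)

def solution_alt (sales : List Int) (links : List (Int × Int)) : Int :=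
  let ch := pvChildMap links
  let reach := pvReach links
  let vals := pvBLoop sales ch reach (links.length + 2) PySem.Dict.empty
  match vals.get? 1 with
  | some v => min v.1 v.2
  | none => 0   -- the Python while-loop would not have terminated; unreachable under Pre_

-- ===== PRECONDITION & SPEC =====
-- Pre_ excludes exactly the inputs on which the Python A raises: an out-of-range sales
-- index at a node reachable from 1 (IndexError), or a cycle reachable from 1 (the
-- recursion would not terminate).  Reachability/acyclicity is a graph property of the
-- INPUT (membership closure of the link relation from node 1; links.length rounds always
-- reach the closure) — no value computed by either port is re-run here.
def Pre_solution (sales : List Int) (links : List (Int × Int)) : Prop :=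
  (∀ n ∈ pvReach links, PySem.Raise.InRange sales.length (n - 1)) ∧
  (∀ n ∈ pvReach links, n ∉ pvGrow links (links.length + 1) ((pvChildMap links).getD n []))

instance (sales : List Int) (links : List (Int × Int)) : Decidable (Pre_solution sales links) := by
  unfold Pre_solution; infer_instance

def pvWitness_solution : List Int × (List (Int × Int)) := ([10, 20, 30], [(1, 2), (1, 3)])

def Spec_solution (sales : List Int) (links : List (Int × Int)) (out : Int) : Prop :=
  out = solution_alt sales links
instance (sales : List Int) (links : List (Int × Int)) (out : Int) : Decidable (Spec_solution sales links out) := by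
  unfold Spec_solution; infer_instance

-- ===== CLAIM (what is proved, stated in full; the proofs are below) =====
def Claim_equal_solution : Prop := ∀ (sales : List Int) (links : List (Int × Int)), Dom_solution sales links → Pre_solution sales links → Spec_solution sales links (solution sales links)

-- ===== LEMMAS AND PROOFS =====

-- the fuel-indexed mathematical value of A's recursion (proof-side only)
def tmv (sales : List Int) (ch : PySem.Dict Int (PySem.Set Int)) : Nat → Int → Option (Int × Int)
  | 0, _ => none
  | fuel+1, n =>
    match ch.get? n with
    | none => (PySem.List.pyGet? sales (n - 1)).map (fun s => ((0 : Int), s))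
    | some cs =>
      if cs.all (fun c => (tmv sales ch fuel c).isSome) then
        let g := fun c => (tmv sales ch fuel c).getD ((0 : Int), (0 : Int))
        let sc := pvSumCh g cs
        match pvMinCh g sc cs with
        | some fm => (PySem.List.pyGet? sales (n - 1)).map (fun s => (fm, s + sc))
        | none => none
      else none
  termination_by fuel _ => fuel

def stableV (sales : List Int) (ch : PySem.Dict Int (PySem.Set Int)) (n : Int) (v : Int × Int) : Prop :=
  ∃ f, tmv sales ch f n = some v

theorem pvSumCh_congr (g g' : Int → Int × Int) (cs : List Int)
    (h : ∀ c ∈ cs, g c = g' c) : pvSumCh g cs = pvSumCh g' cs := by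
  unfold pvSumCh
  exact PySem.List.foldl_congr_mem cs _ _ 0 (fun acc x hx => by rw [h x hx])

theorem pvMinCh_congr (g g' : Int → Int × Int) (sc : Int) (cs : List Int)
    (h : ∀ c ∈ cs, g c = g' c) : pvMinCh g sc cs = pvMinCh g' sc cs := by
  unfold pvMinCh
  exact PySem.List.foldl_congr_mem cs _ _ none (fun acc x hx => by rw [h x hx])

theorem pvMinCh_acc_isSome (g : Int → Int × Int) (sc : Int) (cs : List Int) (mn : Int) :
    (cs.foldl (fun mn c =>
      (some (match mn with
             | none => sc - min (g c).1 (g c).2 + (g c).2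
             | some x => min x (sc - min (g c).1 (g c).2 + (g c).2)) : Option Int)) (some mn)).isSome := by
  induction cs generalizing mn with
  | nil => simp
  | cons c cs ih => simpa using ih _

theorem pvMinCh_isSome (g : Int → Int × Int) (sc : Int) (cs : List Int) (h : cs ≠ []) :
    (pvMinCh g sc cs).isSome := by
  cases cs with
  | nil => exact absurd rfl h
  | cons c cs => simpa [pvMinCh] using pvMinCh_acc_isSome g sc cs _


theorem tmv_mono (sales : List Int) (ch : PySem.Dict Int (PySem.Set Int)) :
    ∀ (f : Nat) (n : Int) (v : Int × Int),
      tmv sales ch f n = some v → tmv sales ch (f + 1) n = some v := by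
  intro f
  induction f with
  | zero => intro n v h; simp [tmv] at h
  | succ f ih =>
    intro n v h
    rw [tmv] at h ⊢
    cases hc : ch.get? n with
    | none => simp only [hc] at h ⊢; exact h
    | some cs =>
      simp only [hc] at h ⊢
      by_cases hall : cs.all (fun c => (tmv sales ch f c).isSome) = true
      · have hall' : cs.all (fun c => (tmv sales ch (f + 1) c).isSome) = true := by
          simp only [List.all_eq_true] at hall ⊢
          intro c hcmem
          obtain ⟨w, hw⟩ := Option.isSome_iff_exists.mp (by simpa using hall c hcmem)
          simp [ih c w hw]
        have hg : ∀ c ∈ cs, (fun c => (tmv sales ch (f + 1) c).getD ((0 : Int), (0 : Int))) c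
            = (fun c => (tmv sales ch f c).getD ((0 : Int), (0 : Int))) c := by
          intro c hcmem
          simp only [List.all_eq_true] at hall
          obtain ⟨w, hw⟩ := Option.isSome_iff_exists.mp (by simpa using hall c hcmem)
          simp [hw, ih c w hw]
        rw [if_pos hall] at h
        rw [if_pos hall']
        rw [pvSumCh_congr _ _ cs hg, pvMinCh_congr _ _ _ cs hg]
        exact h
      · rw [if_neg hall] at h; exact absurd h (by simp)

theorem tmv_mono_le (sales : List Int) (ch : PySem.Dict Int (PySem.Set Int))
    {f g : Nat} (hfg : f ≤ g) {n : Int} {v : Int × Int}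
    (h : tmv sales ch f n = some v) : tmv sales ch g n = some v := by
  induction g with
  | zero => cases Nat.le_zero.mp hfg; exact h
  | succ g ih =>
    rcases Nat.lt_or_ge f (g + 1) with hlt | hge
    · exact tmv_mono sales ch g n v (ih (Nat.lt_succ_iff.mp hlt))
    · cases Nat.le_antisymm hfg hge; exact h

theorem stableV_unique (sales : List Int) (ch : PySem.Dict Int (PySem.Set Int))
    {n : Int} {v w : Int × Int} (hv : stableV sales ch n v) (hw : stableV sales ch n w) : v = w := by
  obtain ⟨f, hf⟩ := hv
  obtain ⟨g, hg⟩ := hw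
  have h1 := tmv_mono_le sales ch (Nat.le_max_left f g) hf
  have h2 := tmv_mono_le sales ch (Nat.le_max_right f g) hg
  rw [h1] at h2
  exact Option.some.inj h2

theorem common_fuel (sales : List Int) (ch : PySem.Dict Int (PySem.Set Int))
    (cs : List Int) (gv : Int → Int × Int)
    (h : ∀ c ∈ cs, stableV sales ch c (gv c)) :
    ∃ g, ∀ c ∈ cs, tmv sales ch g c = some (gv c) := by
  induction cs with
  | nil => exact ⟨0, by simp⟩
  | cons c cs ih =>
    obtain ⟨g1, hg1⟩ := ih (fun x hx => h x (List.mem_cons_of_mem c hx))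
    obtain ⟨g0, hg0⟩ := h c List.mem_cons_self
    refine ⟨max g0 g1, ?_⟩
    intro x hx
    rcases List.mem_cons.mp hx with rfl | hx
    · exact tmv_mono_le sales ch (Nat.le_max_left g0 g1) hg0
    · exact tmv_mono_le sales ch (Nat.le_max_right g0 g1) (hg1 x hx)

theorem childMap_mem_aux (links : List (Int × Int)) :
    ∀ (d : PySem.Dict Int (PySem.Set Int)) (n c : Int),
      (c ∈ (links.foldl (fun d pc => d.insert pc.1 (PySem.Set.add (d.getD pc.1 PySem.Set.empty) pc.2)) d).getD n []
        ↔ c ∈ d.getD n [] ∨ (n, c) ∈ links) := by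
  induction links with
  | nil => simp
  | cons pc rest ih =>
    intro d n c
    obtain ⟨p, q⟩ := pc
    rw [List.foldl_cons, ih]
    rw [PySem.Dict.getD_insert]
    by_cases hnk : n = p
    · subst hnk
      simp only [List.mem_cons, Prod.mk.injEq, if_true]
      have h0 : (PySem.Dict.getD d n PySem.Set.empty : List Int) = d.getD n [] := rfl
      rw [h0, PySem.Set.mem_add]
      tauto
    · simp only [if_neg hnk, List.mem_cons, Prod.mk.injEq]
      tauto

theorem childMap_mem (links : List (Int × Int)) (n c : Int) :
    c ∈ (pvChildMap links).getD n [] ↔ (n, c) ∈ links := by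
  have := childMap_mem_aux links PySem.Dict.empty n c
  simpa [pvChildMap, PySem.Dict.getD_empty] using this

theorem set_add_ne_nil (s : PySem.Set Int) (x : Int) : PySem.Set.add s x ≠ [] := by
  unfold PySem.Set.add
  split
  · rename_i hcon
    have hx : x ∈ s := (PySem.Set.contains_iff s x).mp hcon
    intro hnil
    rw [hnil] at hx
    simp at hx
  · simp

theorem childMap_nonempty_aux (links : List (Int × Int)) :
    ∀ (d : PySem.Dict Int (PySem.Set Int)),
      (∀ k cs, d.get? k = some cs → cs ≠ []) →
      ∀ k cs, ((links.foldl (fun d pc => d.insert pc.1 (PySem.Set.add (d.getD pc.1 PySem.Set.empty) pc.2)) d).get? k = some cs → cs ≠ []) := by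
  induction links with
  | nil => intro d hd; simpa using hd
  | cons pc rest ih =>
    intro d hd k cs
    rw [List.foldl_cons]
    refine ih _ ?_ k cs
    intro k' cs' h
    rw [PySem.Dict.get?_insert] at h
    split at h
    · cases Option.some.inj h; exact set_add_ne_nil _ _
    · exact hd k' cs' h

theorem childMap_nonempty (links : List (Int × Int)) (k : Int) (cs : PySem.Set Int)
    (h : (pvChildMap links).get? k = some cs) : cs ≠ [] :=
  childMap_nonempty_aux links PySem.Dict.empty (by simp [PySem.Dict.get?_empty]) k cs h

theorem childMap_nodup_aux (links : List (Int × Int)) :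
    ∀ (d : PySem.Dict Int (PySem.Set Int)),
      (∀ k, (d.getD k [] : List Int).Nodup) →
      ∀ k, (((links.foldl (fun d pc => d.insert pc.1 (PySem.Set.add (d.getD pc.1 PySem.Set.empty) pc.2)) d).getD k [] : List Int)).Nodup := by
  induction links with
  | nil => intro d hd; simpa using hd
  | cons pc rest ih =>
    intro d hd k
    rw [List.foldl_cons]
    refine ih _ ?_ k
    intro k'
    rw [PySem.Dict.getD_insert]
    split
    · exact PySem.Set.nodup_add _ _ (hd pc.1)
    · exact hd k'

theorem childMap_nodup (links : List (Int × Int)) (k : Int) :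
    ((pvChildMap links).getD k [] : List Int).Nodup :=
  childMap_nodup_aux links PySem.Dict.empty (by simp [PySem.Dict.getD_empty]) k

def pvClosed (links : List (Int × Int)) (r : List Int) : Prop :=
  ∀ pc ∈ links, pc.1 ∈ r → pc.2 ∈ r

theorem pvNew_mem (links : List (Int × Int)) (r : PySem.Set Int) (x : Int) :
    x ∈ pvNew links r ↔ ((∃ pc ∈ links, pc.1 ∈ r ∧ pc.2 = x) ∧ x ∉ r) := by
  unfold pvNew
  rw [PySem.Set.mem_diff, PySem.Set.mem_ofList]
  simp only [List.mem_map, List.mem_filter, PySem.Set.contains_iff]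
  constructor
  · rintro ⟨⟨pc, ⟨hpc, hin⟩, rfl⟩, hnotr⟩
    exact ⟨⟨pc, hpc, hin, rfl⟩, hnotr⟩
  · rintro ⟨⟨pc, hpc, hin, rfl⟩, hnotr⟩
    exact ⟨⟨pc, ⟨hpc, hin⟩, rfl⟩, hnotr⟩

theorem pvNew_empty_iff (links : List (Int × Int)) (r : PySem.Set Int) :
    pvNew links r = [] ↔ pvClosed links r := by
  constructor
  · intro h pc hpc hin
    by_contra hnot
    have : pc.2 ∈ pvNew links r := (pvNew_mem links r pc.2).mpr ⟨⟨pc, hpc, hin, rfl⟩, hnot⟩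
    rw [h] at this
    simp at this
  · intro h
    rw [List.eq_nil_iff_forall_not_mem]
    intro x hx
    obtain ⟨⟨pc, hpc, hin, rfl⟩, hnot⟩ := (pvNew_mem links r x).mp hx
    exact hnot (h pc hpc hin)

theorem pvNew_nodup (links : List (Int × Int)) (r : PySem.Set Int) : (pvNew links r).Nodup := by
  unfold pvNew PySem.Set.diff
  exact List.Nodup.filter _ (PySem.Set.nodup_ofList _)

theorem nodup_sub_length {a b : List Int} (ha : a.Nodup) (hb : b.Nodup)
    (hsub : ∀ x ∈ a, x ∈ b) : a.length ≤ b.length := by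
  rw [← List.toFinset_card_of_nodup ha, ← List.toFinset_card_of_nodup hb]
  exact Finset.card_le_card (fun x hx => List.mem_toFinset.mpr (hsub x (List.mem_toFinset.mp hx)))

theorem nodup_sub_length_lt {a b : List Int} {y : Int} (ha : a.Nodup) (hb : b.Nodup)
    (hsub : ∀ x ∈ a, x ∈ b) (hyb : y ∈ b) (hya : y ∉ a) : a.length + 1 ≤ b.length := by
  rw [← List.toFinset_card_of_nodup ha, ← List.toFinset_card_of_nodup hb]
  have hsub' : a.toFinset ⊆ b.toFinset.erase y := by
    intro x hx
    have hxa := List.mem_toFinset.mp hx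
    exact Finset.mem_erase.mpr ⟨fun hxy => hya (hxy ▸ hxa), List.mem_toFinset.mpr (hsub x hxa)⟩
  have h1 := Finset.card_le_card hsub'
  have h2 : (b.toFinset.erase y).card = b.toFinset.card - 1 :=
    Finset.card_erase_of_mem (List.mem_toFinset.mpr hyb)
  have h3 : 1 ≤ b.toFinset.card := Finset.card_pos.mpr ⟨y, List.mem_toFinset.mpr hyb⟩
  omega

theorem union_length_lt {r nw : PySem.Set Int} (hr : r.Nodup) (_hnw : nw.Nodup)
    (hne : nw ≠ []) (hdis : ∀ x ∈ nw, x ∉ r) :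
    r.length + 1 ≤ (PySem.Set.union r nw).length := by
  obtain ⟨y, hy⟩ := List.exists_mem_of_ne_nil nw hne
  refine nodup_sub_length_lt hr (PySem.Set.nodup_union r nw hr) ?_ ?_ (hdis y hy)
  · intro x hx; exact (PySem.Set.mem_union r nw x).mpr (Or.inl hx)
  · exact (PySem.Set.mem_union r nw y).mpr (Or.inr hy)

theorem pvGrow_mono_start (links : List (Int × Int)) :
    ∀ (f : Nat) (r : PySem.Set Int) (x : Int), x ∈ r → x ∈ pvGrow links f r := by
  intro f
  induction f with
  | zero => intro r x hx; simpa [pvGrow] using hx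
  | succ f ih =>
    intro r x hx
    rw [pvGrow]
    split
    · exact hx
    · exact ih _ x ((PySem.Set.mem_union _ _ x).mpr (Or.inl hx))

theorem pvGrow_mem (links : List (Int × Int)) :
    ∀ (f : Nat) (r : PySem.Set Int) (x : Int), x ∈ pvGrow links f r → x ∈ r ∨ x ∈ links.map (·.2) := by
  intro f
  induction f with
  | zero => intro r x hx; exact Or.inl (by simpa [pvGrow] using hx)
  | succ f ih =>
    intro r x hx
    rw [pvGrow] at hx
    split at hx
    · exact Or.inl hx
    · rcases ih _ x hx with h | h
      · rcases (PySem.Set.mem_union _ _ x).mp h with h' | h'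
        · exact Or.inl h'
        · obtain ⟨⟨pc, hpc, _, rfl⟩, _⟩ := (pvNew_mem links _ x).mp h'
          exact Or.inr (List.mem_map.mpr ⟨pc, hpc, rfl⟩)
      · exact Or.inr h

theorem pvGrow_nodup (links : List (Int × Int)) :
    ∀ (f : Nat) (r : PySem.Set Int), r.Nodup → (pvGrow links f r).Nodup := by
  intro f
  induction f with
  | zero => intro r hr; simpa [pvGrow] using hr
  | succ f ih =>
    intro r hr
    rw [pvGrow]
    split
    · exact hr
    · exact ih _ (PySem.Set.nodup_union _ _ hr)

theorem pvGrow_closed (links : List (Int × Int)) (univ : List Int)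
    (hu : univ.Nodup) (ht : ∀ x ∈ links.map (·.2), x ∈ univ) :
    ∀ (f : Nat) (r : PySem.Set Int), r.Nodup → (∀ x ∈ r, x ∈ univ) →
      univ.length + 1 ≤ r.length + f → pvClosed links (pvGrow links f r) := by
  intro f
  induction f with
  | zero =>
    intro r hr hrs hlen
    have := nodup_sub_length hr hu hrs
    exact absurd hlen (by omega)
  | succ f ih =>
    intro r hr hrs hlen
    rw [pvGrow]
    split
    · rename_i hemp
      exact (pvNew_empty_iff links r).mp (List.isEmpty_iff.mp hemp)
    · rename_i hemp
      have hne : pvNew links r ≠ [] := fun h => hemp (by simp [h])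
      have hdis : ∀ x ∈ pvNew links r, x ∉ r := fun x hx => ((pvNew_mem links r x).mp hx).2
      refine ih _ (PySem.Set.nodup_union _ _ hr) ?_ ?_
      · intro x hx
        rcases (PySem.Set.mem_union _ _ x).mp hx with h | h
        · exact hrs x h
        · obtain ⟨⟨pc, hpc, _, rfl⟩, _⟩ := (pvNew_mem links _ x).mp h
          exact ht _ (List.mem_map.mpr ⟨pc, hpc, rfl⟩)
      · have := union_length_lt hr (pvNew_nodup links r) hne hdis
        omega

theorem pvGrow_subset_closed (links : List (Int × Int)) (t : List Int) (htc : pvClosed links t) :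
    ∀ (f : Nat) (r : PySem.Set Int), (∀ x ∈ r, x ∈ t) → ∀ x ∈ pvGrow links f r, x ∈ t := by
  intro f
  induction f with
  | zero => intro r hrt x hx; exact hrt x (by simpa [pvGrow] using hx)
  | succ f ih =>
    intro r hrt x hx
    rw [pvGrow] at hx
    split at hx
    · exact hrt x hx
    · refine ih _ ?_ x hx
      intro y hy
      rcases (PySem.Set.mem_union _ _ y).mp hy with h | h
      · exact hrt y h
      · obtain ⟨⟨pc, hpc, hin, rfl⟩, _⟩ := (pvNew_mem links _ y).mp h
        exact htc pc hpc (hrt _ hin)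

def pvDset (links : List (Int × Int)) (n : Int) : PySem.Set Int :=
  pvGrow links (links.length + 1) ((pvChildMap links).getD n [])

theorem start_one_eq : (PySem.Set.add PySem.Set.empty (1 : Int) : List Int) = [1] := rfl

theorem reach_one (links : List (Int × Int)) : (1 : Int) ∈ pvReach links := by
  unfold pvReach
  apply pvGrow_mono_start
  rw [start_one_eq]
  simp

theorem reach_closed (links : List (Int × Int)) : pvClosed links (pvReach links) := by
  unfold pvReach
  refine pvGrow_closed links (PySem.Set.ofList (1 :: links.map (·.2)))
    (PySem.Set.nodup_ofList _) ?_ _ _ ?_ ?_ ?_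
  · intro x hx
    rw [PySem.Set.mem_ofList]
    exact List.mem_cons_of_mem _ hx
  · rw [start_one_eq]; simp
  · intro x hx
    rw [start_one_eq] at hx
    rw [PySem.Set.mem_ofList]
    simp at hx
    simp [hx]
  · have h1 := PySem.Set.length_ofList_le (1 :: links.map (·.2))
    rw [start_one_eq]
    simp only [List.length_cons, List.length_map] at h1
    simp only [List.length_cons, List.length_nil]
    omega

theorem reach_child (links : List (Int × Int)) (n c : Int)
    (hn : n ∈ pvReach links) (hc : c ∈ ((pvChildMap links).getD n [] : List Int)) :
    c ∈ pvReach links :=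
  reach_closed links (n, c) ((childMap_mem links n c).mp hc) hn

theorem dset_start_sub_targets (links : List (Int × Int)) (n : Int) :
    ∀ x ∈ ((pvChildMap links).getD n [] : List Int), x ∈ links.map (·.2) := by
  intro x hx
  exact List.mem_map.mpr ⟨(n, x), (childMap_mem links n x).mp hx, rfl⟩

theorem dset_closed (links : List (Int × Int)) (n : Int) : pvClosed links (pvDset links n) := by
  unfold pvDset
  refine pvGrow_closed links (PySem.Set.ofList (links.map (·.2)))
    (PySem.Set.nodup_ofList _) ?_ _ _ (childMap_nodup links n) ?_ ?_
  · intro x hx; exact (PySem.Set.mem_ofList _ x).mpr hx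
  · intro x hx
    exact (PySem.Set.mem_ofList _ x).mpr (dset_start_sub_targets links n x hx)
  · have h1 := PySem.Set.length_ofList_le (links.map (·.2))
    simp only [List.length_map] at h1
    omega

theorem dset_sub (links : List (Int × Int)) (n c : Int)
    (hc : c ∈ ((pvChildMap links).getD n [] : List Int)) :
    ∀ x ∈ pvDset links c, x ∈ pvDset links n := by
  refine pvGrow_subset_closed links (pvDset links n) (dset_closed links n) _ _ ?_
  intro x hx
  have hcin : c ∈ pvDset links n := pvGrow_mono_start links _ _ c hc
  exact dset_closed links n (c, x) ((childMap_mem links c x).mp hx) hcin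

theorem dset_nodup (links : List (Int × Int)) (n : Int) : (pvDset links n).Nodup :=
  pvGrow_nodup links _ _ (childMap_nodup links n)

theorem dset_lt (links : List (Int × Int)) (n c : Int)
    (hc : c ∈ ((pvChildMap links).getD n [] : List Int))
    (hcc : c ∉ pvDset links c) :
    (pvDset links c).length + 1 ≤ (pvDset links n).length :=
  nodup_sub_length_lt (dset_nodup links c) (dset_nodup links n)
    (dset_sub links n c hc) (pvGrow_mono_start links _ _ c hc) hcc

theorem dset_len_le (links : List (Int × Int)) (n : Int) :
    (pvDset links n).length ≤ links.length := by
  have h1 := PySem.Set.length_ofList_le (links.map (·.2))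
  simp only [List.length_map] at h1
  have h2 : (pvDset links n).length ≤ (PySem.Set.ofList (links.map (·.2)) : List Int).length := by
    refine nodup_sub_length (dset_nodup links n) (PySem.Set.nodup_ofList _) ?_
    intro x hx
    rcases pvGrow_mem links _ _ x hx with h | h
    · exact (PySem.Set.mem_ofList _ x).mpr (dset_start_sub_targets links n x h)
    · exact (PySem.Set.mem_ofList _ x).mpr h
  omega

theorem tmv_total (sales : List Int) (links : List (Int × Int))
    (hpre1 : ∀ n ∈ pvReach links, PySem.Raise.InRange sales.length (n - 1))
    (hpre2 : ∀ n ∈ pvReach links, n ∉ pvDset links n) :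
    ∀ (f : Nat) (n : Int), n ∈ pvReach links → (pvDset links n).length < f →
      ∃ v, tmv sales (pvChildMap links) f n = some v := by
  intro f
  induction f with
  | zero => intro n _ hlen; omega
  | succ f ih =>
    intro n hn hlen
    cases hcs : (pvChildMap links).get? n with
    | none =>
      cases hs : PySem.List.pyGet? sales (n - 1) with
      | none => exact absurd ((PySem.List.pyGet?_eq_none_iff sales (n - 1)).mp hs) (by simpa using hpre1 n hn)
      | some s => exact ⟨((0 : Int), s), by rw [tmv]; simp [hcs, hs]⟩
    | some cs =>
      have hcsd : ((pvChildMap links).getD n [] : List Int) = cs := by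
        rw [PySem.Dict.getD_eq_get?_getD, hcs]; rfl
      have hchild : ∀ c ∈ cs, ∃ v, tmv sales (pvChildMap links) f c = some v := by
        intro c hc
        have hcd : c ∈ ((pvChildMap links).getD n [] : List Int) := hcsd ▸ hc
        have hcr : c ∈ pvReach links := reach_child links n c hn hcd
        refine ih c hcr ?_
        have := dset_lt links n c hcd (hpre2 c hcr)
        omega
      have hall : cs.all (fun c => (tmv sales (pvChildMap links) f c).isSome) = true := by
        rw [List.all_eq_true]
        intro c hc
        obtain ⟨v, hv⟩ := hchild c hc
        simp [hv]
      have hne : cs ≠ [] := childMap_nonempty links n cs hcs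
      obtain ⟨fm, hfm⟩ := Option.isSome_iff_exists.mp
        (pvMinCh_isSome (fun c => (tmv sales (pvChildMap links) f c).getD ((0 : Int), (0 : Int)))
          (pvSumCh (fun c => (tmv sales (pvChildMap links) f c).getD ((0 : Int), (0 : Int))) cs) cs hne)
      cases hs : PySem.List.pyGet? sales (n - 1) with
      | none => exact absurd ((PySem.List.pyGet?_eq_none_iff sales (n - 1)).mp hs) (by simpa using hpre1 n hn)
      | some s =>
        refine ⟨(fm, s + pvSumCh (fun c => (tmv sales (pvChildMap links) f c).getD ((0 : Int), (0 : Int))) cs), ?_⟩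
        rw [tmv]
        simp [hcs, hall, hfm, hs]

def pvGood (sales : List Int) (ch : PySem.Dict Int (PySem.Set Int))
    (d : PySem.Dict Int (Int × Int)) : Prop :=
  ∀ k v, d.get? k = some v → stableV sales ch k v

theorem pvGood_empty (sales : List Int) (ch : PySem.Dict Int (PySem.Set Int)) :
    pvGood sales ch PySem.Dict.empty := by
  intro k v h
  rw [PySem.Dict.get?_empty] at h
  cases h

theorem sumPassA (sales : List Int) (ch : PySem.Dict Int (PySem.Set Int)) (f : Nat)
    (HIH : ∀ (memo : PySem.Dict Int (Int × Int)) (n : Int) (v : Int × Int),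
      pvGood sales ch memo → tmv sales ch f n = some v →
      ∃ memo', twoMinA sales ch f memo n = some (v, memo') ∧ pvGood sales ch memo') :
    ∀ (lst : List Int), (∀ c ∈ lst, (tmv sales ch f c).isSome) →
    ∀ (acc : Int) (memo : PySem.Dict Int (Int × Int)), pvGood sales ch memo →
      ∃ memo',
        lst.foldl (fun st c => st.bind (fun p =>
            (twoMinA sales ch f p.2 c).map (fun q => (p.1 + min q.1.1 q.1.2, q.2))))
          (some (acc, memo))
        = some (lst.foldl (fun a c =>
            a + min ((tmv sales ch f c).getD ((0 : Int), (0 : Int))).1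
                    ((tmv sales ch f c).getD ((0 : Int), (0 : Int))).2) acc, memo')
        ∧ pvGood sales ch memo' := by
  intro lst
  induction lst with
  | nil => intro _ acc memo hgood; exact ⟨memo, rfl, hgood⟩
  | cons c rest ih =>
    intro hall acc memo hgood
    obtain ⟨vc, hvc⟩ := Option.isSome_iff_exists.mp (hall c List.mem_cons_self)
    obtain ⟨m1, h1, hgood1⟩ := HIH memo c vc hgood hvc
    obtain ⟨m2, h2, hgood2⟩ := ih (fun x hx => hall x (List.mem_cons_of_mem c hx))
      (acc + min vc.1 vc.2) m1 hgood1
    refine ⟨m2, ?_, hgood2⟩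
    rw [List.foldl_cons, List.foldl_cons]
    simp only [Option.bind_some, h1, Option.map_some]
    rw [h2, hvc]
    simp

theorem minPassA (sales : List Int) (ch : PySem.Dict Int (PySem.Set Int)) (f : Nat) (sc : Int)
    (HIH : ∀ (memo : PySem.Dict Int (Int × Int)) (n : Int) (v : Int × Int),
      pvGood sales ch memo → tmv sales ch f n = some v →
      ∃ memo', twoMinA sales ch f memo n = some (v, memo') ∧ pvGood sales ch memo') :
    ∀ (lst : List Int), (∀ c ∈ lst, (tmv sales ch f c).isSome) →
    ∀ (mn : Option Int) (memo : PySem.Dict Int (Int × Int)), pvGood sales ch memo →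
      ∃ memo',
        lst.foldl (fun st c => st.bind (fun p =>
            (twoMinA sales ch f p.2 c).bind (fun q1 =>
              (twoMinA sales ch f q1.2 c).map (fun q2 =>
                ((some (match p.1 with
                       | none => sc - min q1.1.1 q1.1.2 + q2.1.2
                       | some x => min x (sc - min q1.1.1 q1.1.2 + q2.1.2)) : Option Int), q2.2)))))
          (some (mn, memo))
        = some (lst.foldl (fun mn c =>
            (some (match mn with
                   | none => sc - min ((tmv sales ch f c).getD ((0 : Int), (0 : Int))).1
                                      ((tmv sales ch f c).getD ((0 : Int), (0 : Int))).2
                             + ((tmv sales ch f c).getD ((0 : Int), (0 : Int))).2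
                   | some x => min x (sc - min ((tmv sales ch f c).getD ((0 : Int), (0 : Int))).1
                                               ((tmv sales ch f c).getD ((0 : Int), (0 : Int))).2
                                      + ((tmv sales ch f c).getD ((0 : Int), (0 : Int))).2)) : Option Int))
            mn, memo')
        ∧ pvGood sales ch memo' := by
  intro lst
  induction lst with
  | nil => intro _ mn memo hgood; exact ⟨memo, rfl, hgood⟩
  | cons c rest ih =>
    intro hall mn memo hgood
    obtain ⟨vc, hvc⟩ := Option.isSome_iff_exists.mp (hall c List.mem_cons_self)
    obtain ⟨m1, h1, hgood1⟩ := HIH memo c vc hgood hvc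
    obtain ⟨m2, h2, hgood2⟩ := HIH m1 c vc hgood1 hvc
    obtain ⟨m3, h3, hgood3⟩ := ih (fun x hx => hall x (List.mem_cons_of_mem c hx)) _ m2 hgood2
    refine ⟨m3, ?_, hgood3⟩
    rw [List.foldl_cons, List.foldl_cons]
    simp only [Option.bind_some, h1, h2, Option.map_some]
    rw [h3, hvc]
    simp

theorem twoMinA_complete (sales : List Int) (ch : PySem.Dict Int (PySem.Set Int)) :
    ∀ (f : Nat) (memo : PySem.Dict Int (Int × Int)) (n : Int) (v : Int × Int),
      pvGood sales ch memo → tmv sales ch f n = some v →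
      ∃ memo', twoMinA sales ch f memo n = some (v, memo') ∧ pvGood sales ch memo' := by
  intro f
  induction f with
  | zero => intro memo n v _ h; simp [tmv] at h
  | succ f ih =>
    intro memo n v hgood h
    have h0 := h
    cases hm : memo.get? n with
    | some w =>
      have hw : stableV sales ch n w := hgood n w hm
      have hv : stableV sales ch n v := ⟨f + 1, h⟩
      have : w = v := stableV_unique sales ch hw hv
      subst this
      exact ⟨memo, by rw [twoMinA]; simp [hm], hgood⟩
    | none =>
      cases hcs : ch.get? n with
      | none =>
        rw [tmv] at h
        simp only [hcs] at h
        cases hs : PySem.List.pyGet? sales (n - 1) with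
        | none => rw [hs] at h; cases h
        | some s =>
          rw [hs] at h
          simp only [Option.map_some] at h
          refine ⟨memo, ?_, hgood⟩
          rw [twoMinA]
          simp only [hm, hcs, hs, Option.map_some]
          exact congrArg some (congrArg (·, memo) (Option.some.inj h))
      | some cs =>
        rw [tmv] at h
        simp only [hcs] at h
        by_cases hall : cs.all (fun c => (tmv sales ch f c).isSome) = true
        · rw [if_pos hall] at h
          have hall' : ∀ c ∈ cs, (tmv sales ch f c).isSome := by
            rw [List.all_eq_true] at hall
            intro c hc; simpa using hall c hc
          obtain ⟨m1, hsum, hgood1⟩ := sumPassA sales ch f ih cs hall' 0 memo hgood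
          cases hfm : pvMinCh (fun c => (tmv sales ch f c).getD ((0 : Int), (0 : Int)))
              (pvSumCh (fun c => (tmv sales ch f c).getD ((0 : Int), (0 : Int))) cs) cs with
          | none => rw [hfm] at h; cases h
          | some fm =>
            rw [hfm] at h
            cases hs : PySem.List.pyGet? sales (n - 1) with
            | none => rw [hs] at h; cases h
            | some s =>
              rw [hs] at h
              simp only [Option.map_some] at h
              obtain ⟨m2, hmin, hgood2⟩ := minPassA sales ch f
                (pvSumCh (fun c => (tmv sales ch f c).getD ((0 : Int), (0 : Int))) cs) ih cs hall'
                none m1 hgood1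
              refine ⟨m2.insert n (fm, s + pvSumCh (fun c => (tmv sales ch f c).getD ((0 : Int), (0 : Int))) cs), ?_, ?_⟩
              · have hsum' : cs.foldl (fun st c => st.bind (fun p =>
                    (twoMinA sales ch f p.2 c).map (fun q => (p.1 + min q.1.1 q.1.2, q.2))))
                    (some ((0 : Int), memo))
                    = some (pvSumCh (fun c => (tmv sales ch f c).getD ((0 : Int), (0 : Int))) cs, m1) := hsum
                have hmin' : cs.foldl (fun st c => st.bind (fun p =>
                    (twoMinA sales ch f p.2 c).bind (fun q1 =>
                      (twoMinA sales ch f q1.2 c).map (fun q2 =>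
                        ((some (match p.1 with
                               | none => pvSumCh (fun c => (tmv sales ch f c).getD ((0 : Int), (0 : Int))) cs - min q1.1.1 q1.1.2 + q2.1.2
                               | some x => min x (pvSumCh (fun c => (tmv sales ch f c).getD ((0 : Int), (0 : Int))) cs - min q1.1.1 q1.1.2 + q2.1.2)) : Option Int), q2.2)))))
                    (some ((none : Option Int), m1))
                    = some (pvMinCh (fun c => (tmv sales ch f c).getD ((0 : Int), (0 : Int)))
                        (pvSumCh (fun c => (tmv sales ch f c).getD ((0 : Int), (0 : Int))) cs) cs, m2) := hmin
                rw [twoMinA]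
                simp only [hm, hcs]
                rw [hsum']
                simp only
                rw [hmin', hfm]
                simp only [hs, Option.map_some]
                rw [Option.some.inj h]
              · intro k w hk
                rw [PySem.Dict.get?_insert] at hk
                split at hk
                · rename_i hkn
                  cases Option.some.inj hk
                  subst hkn
                  exact ⟨f + 1, h0.trans (congrArg some (Option.some.inj h).symm)⟩
                · exact hgood2 k w hk
        · rw [if_neg hall] at h; cases h

theorem pyGetD_get? (xs : List Int) (i : Int) (d : Int) :
    PySem.List.pyGetD xs i d = (PySem.List.pyGet? xs i).getD d := by
  simp [PySem.List.pyGetD, PySem.List.pyGet?]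

theorem stepB_preserves (sales : List Int) (ch : PySem.Dict Int (PySem.Set Int))
    (vals : PySem.Dict Int (Int × Int)) (n k : Int)
    (h : (vals.get? k).isSome) : ((pvStepB sales ch vals n).get? k).isSome := by
  unfold pvStepB
  split
  · exact h
  · split
    · rw [PySem.Dict.get?_insert]
      split
      · simp
      · exact h
    · split
      · split
        · rw [PySem.Dict.get?_insert]
          split
          · simp
          · exact h
        · exact h
      · exact h

theorem stepB_good (sales : List Int) (links : List (Int × Int))
    (hpre1 : ∀ n ∈ pvReach links, PySem.Raise.InRange sales.length (n - 1))
    (vals : PySem.Dict Int (Int × Int)) (n : Int) (hn : n ∈ pvReach links)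
    (hgood : pvGood sales (pvChildMap links) vals) :
    pvGood sales (pvChildMap links) (pvStepB sales (pvChildMap links) vals n) := by
  have hsex : ∃ s, PySem.List.pyGet? sales (n - 1) = some s := by
    cases hsv : PySem.List.pyGet? sales (n - 1) with
    | none => exact absurd ((PySem.List.pyGet?_eq_none_iff sales (n - 1)).mp hsv) (by simpa using hpre1 n hn)
    | some s => exact ⟨s, rfl⟩
  obtain ⟨s, hs⟩ := hsex
  have hsd : PySem.List.pyGetD sales (n - 1) 0 = s := by rw [pyGetD_get?, hs]; rfl
  unfold pvStepB
  split
  · exact hgood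
  · split
    · rename_i _hx hcn
      intro k w hk
      rw [PySem.Dict.get?_insert] at hk
      split at hk
      · rename_i hkn
        cases Option.some.inj hk
        subst hkn
        exact ⟨1, by rw [tmv]; simp [hcn, hs, hsd]⟩
      · exact hgood k w hk
    · rename_i _hx cs hcn
      split
      · rename_i hall
        split
        · rename_i fm hfm
          intro k w hk
          rw [PySem.Dict.get?_insert] at hk
          split at hk
          · rename_i hkn
            cases Option.some.inj hk
            subst hkn
            have hstab : ∀ c ∈ cs, stableV sales (pvChildMap links) c (vals.getD c ((0 : Int), (0 : Int))) := by
              intro c hc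
              rw [List.all_eq_true] at hall
              obtain ⟨wc, hwc⟩ := Option.isSome_iff_exists.mp (by simpa using hall c hc)
              rw [PySem.Dict.getD_eq_get?_getD, hwc]
              exact hgood c wc hwc
            obtain ⟨g, hg⟩ := common_fuel sales (pvChildMap links) cs _ hstab
            have hgfun : ∀ c ∈ cs, (fun c => (tmv sales (pvChildMap links) g c).getD ((0 : Int), (0 : Int))) c
                = (fun c => vals.getD c ((0 : Int), (0 : Int))) c := by
              intro c hc
              simp only
              rw [hg c hc]
              rfl
            refine ⟨g + 1, ?_⟩
            rw [tmv]
            simp only [hcn]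
            have hall' : cs.all (fun c => (tmv sales (pvChildMap links) g c).isSome) = true := by
              rw [List.all_eq_true]
              intro c hc
              simp [hg c hc]
            rw [if_pos hall']
            rw [pvSumCh_congr _ _ cs hgfun, pvMinCh_congr _ _ _ cs hgfun, hfm]
            simp only [hs, Option.map_some]
            rw [hsd]
          · exact hgood k w hk
        · exact hgood
      · exact hgood

theorem roundB_fold_good (sales : List Int) (links : List (Int × Int))
    (hpre1 : ∀ n ∈ pvReach links, PySem.Raise.InRange sales.length (n - 1)) :
    ∀ (lst : List Int), (∀ n ∈ lst, n ∈ pvReach links) →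
    ∀ (vals : PySem.Dict Int (Int × Int)), pvGood sales (pvChildMap links) vals →
      pvGood sales (pvChildMap links) (lst.foldl (pvStepB sales (pvChildMap links)) vals) := by
  intro lst
  induction lst with
  | nil => intro _ vals h; exact h
  | cons c rest ih =>
    intro hmem vals h
    rw [List.foldl_cons]
    exact ih (fun x hx => hmem x (List.mem_cons_of_mem c hx)) _
      (stepB_good sales links hpre1 vals c (hmem c List.mem_cons_self) h)

theorem roundB_good (sales : List Int) (links : List (Int × Int))
    (hpre1 : ∀ n ∈ pvReach links, PySem.Raise.InRange sales.length (n - 1))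
    (vals : PySem.Dict Int (Int × Int)) (h : pvGood sales (pvChildMap links) vals) :
    pvGood sales (pvChildMap links) (pvRoundB sales (pvChildMap links) (pvReach links) vals) :=
  roundB_fold_good sales links hpre1 (pvReach links) (fun _ hx => hx) vals h

theorem foldB_preserves (sales : List Int) (ch : PySem.Dict Int (PySem.Set Int)) :
    ∀ (lst : List Int) (vals : PySem.Dict Int (Int × Int)) (k : Int),
      (vals.get? k).isSome → ((lst.foldl (pvStepB sales ch) vals).get? k).isSome := by
  intro lst
  induction lst with
  | nil => intro vals k h; exact h
  | cons c rest ih =>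
    intro vals k h
    rw [List.foldl_cons]
    exact ih _ k (stepB_preserves sales ch vals c k h)

theorem foldB_sets (sales : List Int) (ch : PySem.Dict Int (PySem.Set Int))
    (vals0 : PySem.Dict Int (Int × Int)) (n : Int)
    (h2 : ∀ (v' : PySem.Dict Int (Int × Int)),
      (∀ k, (vals0.get? k).isSome → (v'.get? k).isSome) →
      ((pvStepB sales ch v' n).get? n).isSome) :
    ∀ (lst : List Int) (vals : PySem.Dict Int (Int × Int)), n ∈ lst →
      (∀ k, (vals0.get? k).isSome → (vals.get? k).isSome) →
      ((lst.foldl (pvStepB sales ch) vals).get? n).isSome := by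
  intro lst
  induction lst with
  | nil => intro vals h; cases h
  | cons c rest ih =>
    intro vals hmem hext
    rw [List.foldl_cons]
    by_cases hcr : n ∈ rest
    · refine ih _ hcr ?_
      intro k hk
      exact stepB_preserves sales ch vals c k (hext k hk)
    · have hcn : c = n := by
        rcases List.mem_cons.mp hmem with h | h
        · exact h.symm
        · exact absurd h hcr
      subst hcn
      exact foldB_preserves sales ch rest _ c (h2 vals hext)

def pvIterFrom (sales : List Int) (ch : PySem.Dict Int (PySem.Set Int)) (reach : List Int) :
    PySem.Dict Int (Int × Int) → Nat → PySem.Dict Int (Int × Int)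
  | vals, 0 => vals
  | vals, k+1 => pvIterFrom sales ch reach (pvRoundB sales ch reach vals) k

theorem pvIterFrom_succ_last (sales : List Int) (ch : PySem.Dict Int (PySem.Set Int)) (reach : List Int) :
    ∀ (k : Nat) (vals : PySem.Dict Int (Int × Int)),
      pvIterFrom sales ch reach vals (k + 1) = pvRoundB sales ch reach (pvIterFrom sales ch reach vals k) := by
  intro k
  induction k with
  | zero => intro vals; rfl
  | succ k ih => intro vals; rw [pvIterFrom, ih]; rfl

theorem roundB_complete (sales : List Int) (links : List (Int × Int)) :
    ∀ (k : Nat) (n : Int) (v : Int × Int), n ∈ pvReach links →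
      tmv sales (pvChildMap links) k n = some v →
      ((pvIterFrom sales (pvChildMap links) (pvReach links) PySem.Dict.empty k).get? n).isSome := by
  intro k
  induction k with
  | zero => intro n v _ h; simp [tmv] at h
  | succ k ih =>
    intro n v hn h
    rw [pvIterFrom_succ_last]
    unfold pvRoundB
    refine foldB_sets sales (pvChildMap links) _ n ?_ (pvReach links) _ hn (fun _ hk => hk)
    intro v' hext
    unfold pvStepB
    split
    · rename_i hsome; exact hsome
    · split
      · rw [PySem.Dict.get?_insert]
        simp
      · rename_i _hx cs hcn
        rw [tmv] at h
        simp only [hcn] at h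
        by_cases hall : cs.all (fun c => (tmv sales (pvChildMap links) k c).isSome) = true
        · have hall2 : cs.all (fun c => (v'.get? c).isSome) = true := by
            rw [List.all_eq_true] at hall ⊢
            intro c hc
            obtain ⟨wc, hwc⟩ := Option.isSome_iff_exists.mp (by simpa using hall c hc)
            have hcr : c ∈ pvReach links := reach_child links n c hn (by
              rw [PySem.Dict.getD_eq_get?_getD, hcn]; exact hc)
            simpa using hext c (ih c wc hcr hwc)
          rw [if_pos hall2]
          have hne : cs ≠ [] := childMap_nonempty links n cs hcn
          obtain ⟨fm, hfm⟩ := Option.isSome_iff_exists.mp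
            (pvMinCh_isSome (fun c => v'.getD c ((0 : Int), (0 : Int)))
              (pvSumCh (fun c => v'.getD c ((0 : Int), (0 : Int))) cs) cs hne)
          rw [hfm]
          rw [PySem.Dict.get?_insert]
          simp
        · rw [if_neg hall] at h
          cases h

theorem bloopB (sales : List Int) (links : List (Int × Int))
    (hpre1 : ∀ n ∈ pvReach links, PySem.Raise.InRange sales.length (n - 1)) :
    ∀ (f : Nat) (vals : PySem.Dict Int (Int × Int)) (k : Nat),
      pvGood sales (pvChildMap links) vals → k ≤ f →
      ((pvIterFrom sales (pvChildMap links) (pvReach links) vals k).get? 1).isSome →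
      ∃ v, (pvBLoop sales (pvChildMap links) (pvReach links) f vals).get? 1 = some v ∧
        stableV sales (pvChildMap links) 1 v := by
  intro f
  induction f with
  | zero =>
    intro vals k hgood hk hiter
    cases Nat.le_zero.mp hk
    obtain ⟨v, hv⟩ := Option.isSome_iff_exists.mp hiter
    exact ⟨v, hv, hgood 1 v hv⟩
  | succ f ih =>
    intro vals k hgood hk hiter
    by_cases h1 : (vals.get? 1).isSome
    · obtain ⟨v, hv⟩ := Option.isSome_iff_exists.mp h1
      refine ⟨v, ?_, hgood 1 v hv⟩
      rw [pvBLoop, if_pos h1]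
      exact hv
    · cases k with
      | zero => exact absurd hiter h1
      | succ k =>
        rw [pvBLoop, if_neg h1]
        exact ih (pvRoundB sales (pvChildMap links) (pvReach links) vals) k
          (roundB_good sales links hpre1 vals hgood) (by omega) hiter

theorem solution_spec : Claim_equal_solution := by
  intro sales links hdom hpre
  unfold Spec_solution
  obtain ⟨hpre1, hpre2⟩ := hpre
  obtain ⟨v0, hv0⟩ := tmv_total sales links hpre1
    (fun n hn => by simpa [pvDset] using hpre2 n hn)
    (links.length + 1) 1 (reach_one links)
    (by have := dset_len_le links 1; omega)
  obtain ⟨m', hA, _⟩ := twoMinA_complete sales (pvChildMap links) (links.length + 1)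
    PySem.Dict.empty 1 v0 (pvGood_empty _ _) hv0
  have hiter := roundB_complete sales links (links.length + 1) 1 v0 (reach_one links) hv0
  obtain ⟨w, hw, hwst⟩ := bloopB sales links hpre1 (links.length + 2) PySem.Dict.empty
    (links.length + 1) (pvGood_empty _ _) (by omega) hiter
  have hwv : w = v0 := stableV_unique sales (pvChildMap links) hwst ⟨links.length + 1, hv0⟩
  simp only [solution, solution_alt]
  rw [hA, hw, hwv]
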